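-- pv_equiv track=rewrite | github.com/habroptilus/AOJ | Python/volume0/0022.py | partial_max
-- ===== SOURCE A (Python) =====
-- def partial_max(L):
--     n=len(L)
--     max=-100000000000
--     max_i=0
--     for i in range(n):
--        if max < sum(L[:i+1]):
--            max=sum(L[:i+1])
--            max_i=i
--     max = -100000000000
--     max_j=0
--     for j in range(n):
--        if max < sum(L[j:]):
--            max=sum(L[j:])
--            max_j=j
--
--     if max_i >= max_j:
--         return sum(L[max_j:max_i+1])
--     elif sum(L[max_j:])>sum(L[:max_i+1]):
--         return sum(L[max_j:])
--     else:
--         return sum(L[:max_i+1])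
-- ===== SOURCE B (Python) =====
-- def partial_max(L):
--     if not L:
--         return 0
--     pref = []
--     s = 0
--     for x in L:
--         s += x
--         pref.append(s)          # pref[i] = sum(L[:i+1])
--     total = s
--     # first index maximizing the prefix sum pref[i]
--     best_i, max_i = pref[0], 0
--     for i, v in enumerate(pref):
--         if v > best_i:
--             best_i, max_i = v, i
--     # suffix sum L[j:] = total - sum(L[:j]); first argmax of it
--     # = first j minimizing sum(L[:j]), i.e. first argmin over [0, pref[0], ..., pref[n-2]]
--     best_j, max_j = 0, 0
--     for j, p in enumerate(pref[:-1], start=1):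
--         if p < best_j:
--             best_j, max_j = p, j
--     if max_i >= max_j:
--         return best_i - best_j
--     suf = total - best_j
--     return suf if suf > best_i else best_i
-- ===== Notes on version B (the rewrite author's own statement) =====
-- stated objective: faster
-- what changed: replaces the quadratic re-summation of slices (sum(L[:i+1]) and sum(L[j:]) recomputed inside each loop iteration) by one prefix-sum pass followed by two linear first-argmax/argmin scans over the prefix array
import Mathlib
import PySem

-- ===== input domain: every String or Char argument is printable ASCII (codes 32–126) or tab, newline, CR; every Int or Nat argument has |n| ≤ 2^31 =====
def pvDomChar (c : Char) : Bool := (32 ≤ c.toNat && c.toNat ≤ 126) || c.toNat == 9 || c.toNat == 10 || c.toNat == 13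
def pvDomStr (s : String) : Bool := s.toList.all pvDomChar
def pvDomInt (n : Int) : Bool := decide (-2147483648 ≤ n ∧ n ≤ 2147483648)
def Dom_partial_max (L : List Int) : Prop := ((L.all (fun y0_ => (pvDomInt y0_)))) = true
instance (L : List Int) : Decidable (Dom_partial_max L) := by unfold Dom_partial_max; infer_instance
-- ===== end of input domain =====

-- B replaces A's quadratic slice re-summation by one prefix-sum pass and two linear scans (faster).

-- ===== PORT A =====
def partial_max (L : List Int) : Int :=
  let n : Int := (L.length : Int)
  let st1 := (PySem.List.pyRange 0 n 1).foldl
    (fun (st : Int × Int) i =>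
      if st.1 < (PySem.List.slice L none (some (i + 1))).sum then
        ((PySem.List.slice L none (some (i + 1))).sum, i)
      else st)
    (-100000000000, 0)
  let st2 := (PySem.List.pyRange 0 n 1).foldl
    (fun (st : Int × Int) j =>
      if st.1 < (PySem.List.slice L (some j) none).sum then
        ((PySem.List.slice L (some j) none).sum, j)
      else st)
    (-100000000000, 0)
  if st1.2 ≥ st2.2 then (PySem.List.slice L (some st2.2) (some (st1.2 + 1))).sum
  else if (PySem.List.slice L (some st2.2) none).sum > (PySem.List.slice L none (some (st1.2 + 1))).sum then
    (PySem.List.slice L (some st2.2) none).sum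
  else
    (PySem.List.slice L none (some (st1.2 + 1))).sum

-- ===== PORT B =====
def partial_max_alt (L : List Int) : Int :=
  if L = [] then 0
  else
    let sp := L.foldl (fun (st : Int × List Int) x => (st.1 + x, st.2 ++ [st.1 + x])) (0, [])
    let total := sp.1
    let pref := sp.2
    let st1 := (PySem.List.enumerate pref 0).foldl
      (fun (st : Int × Int) iv => if iv.2 > st.1 then (iv.2, iv.1) else st)
      (pref.headD 0, 0)
    let st2 := (PySem.List.enumerate pref.dropLast 1).foldl
      (fun (st : Int × Int) jp => if jp.2 < st.1 then (jp.2, jp.1) else st)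
      (0, 0)
    if st1.2 ≥ st2.2 then st1.1 - st2.1
    else
      let suf := total - st2.1
      if suf > st1.1 then suf else st1.1

-- ===== PRECONDITION & SPEC =====
def Spec_partial_max (L : List Int) (out : Int) : Prop := out = partial_max_alt L
instance (L : List Int) (out : Int) : Decidable (Spec_partial_max L out) := by unfold Spec_partial_max; infer_instance

-- ===== CLAIM (what is proved, stated in full; the proofs are below) =====
def Claim_equal_partial_max : Prop := ∀ (L : List Int), Dom_partial_max L → Spec_partial_max L (partial_max L)

-- ===== LEMMAS AND PROOFS =====

-- prefix-sum list built by B's first loop: pxs s L = [s+L0, s+L0+L1, …]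
def pxs (s : Int) : List Int → List Int
  | [] => []
  | x :: xs => (s + x) :: pxs (s + x) xs

theorem pxs_length (L : List Int) : ∀ s, (pxs s L).length = L.length := by
  induction L with
  | nil => intro s; rfl
  | cons x xs ih => intro s; simp [pxs, ih]

theorem pxs_getElem (L : List Int) : ∀ (s : Int) (k : Nat) (hk : k < (pxs s L).length),
    (pxs s L)[k] = s + (L.take (k + 1)).sum := by
  induction L with
  | nil => intro s k hk; simp [pxs] at hk
  | cons x xs ih =>
    intro s k hk
    cases k with
    | zero => simp [pxs]
    | succ k =>
      have hk' : k < (pxs (s + x) xs).length := by simpa [pxs] using hk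
      simp [pxs, ih (s + x) k hk', List.take_succ_cons]
      ring

theorem b_build (L : List Int) : ∀ (s : Int) (acc : List Int),
    L.foldl (fun (st : Int × List Int) x => (st.1 + x, st.2 ++ [st.1 + x])) (s, acc)
      = (s + L.sum, acc ++ pxs s L) := by
  induction L with
  | nil => intro s acc; simp [pxs]
  | cons x xs ih =>
    intro s acc
    simp [pxs, ih (s + x) (acc ++ [s + x])]
    omega

-- sum of a drop
theorem sum_drop (L : List Int) (k : Nat) : (L.drop k).sum = L.sum - (L.take k).sum := by
  have h := List.take_append_drop k L
  have : (L.take k).sum + (L.drop k).sum = L.sum := by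
    conv_rhs => rw [← h]
    simp
  omega

-- fold over indices = fold over (index, value) pairs, "max" direction
theorem fold_pairs_gt (v : Int → Int) : ∀ (is : List Int) (st : Int × Int),
    is.foldl (fun (st : Int × Int) i => if st.1 < v i then (v i, i) else st) st
      = (is.map (fun i => (i, v i))).foldl
          (fun (st : Int × Int) p => if p.2 > st.1 then (p.2, p.1) else st) st := by
  intro is
  induction is with
  | nil => intro st; rfl
  | cons i rest ih => intro st; simp only [List.map_cons, List.foldl_cons, gt_iff_lt]; exact ih _

-- fold over indices = fold over (index, value) pairs, "min" direction
theorem fold_pairs_lt (v : Int → Int) : ∀ (is : List Int) (st : Int × Int),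
    is.foldl (fun (st : Int × Int) j => if v j < st.1 then (v j, j) else st) st
      = (is.map (fun i => (i, v i))).foldl
          (fun (st : Int × Int) p => if p.2 < st.1 then (p.2, p.1) else st) st := by
  intro is
  induction is with
  | nil => intro st; rfl
  | cons i rest ih => intro st; simp only [List.map_cons, List.foldl_cons]; exact ih _

-- invariant for A's suffix loop vs B's argmin loop, through the sentinel wrapper
theorem inv2 (total : Int) (w : Int → Int) :
    ∀ (is : List Int) (b mj : Int),
    is.foldl (fun (st : Int × Int) j => if st.1 < total - w j then (total - w j, j) else st)
      (if (-100000000000 : Int) < total - b then (total - b, mj) else (-100000000000, 0))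
    = (fun r : Int × Int =>
        if (-100000000000 : Int) < total - r.1 then (total - r.1, r.2) else (-100000000000, 0))
        (is.foldl (fun (st : Int × Int) j => if w j < st.1 then (w j, j) else st) (b, mj)) := by
  intro is
  induction is with
  | nil => intro b mj; rfl
  | cons j rest ih =>
    intro b mj
    simp only [List.foldl_cons]
    by_cases hb : (-100000000000 : Int) < total - b
    · rw [if_pos hb]
      by_cases hu : w j < b
      · rw [if_pos (show total - b < total - w j by omega), if_pos hu]
        have H := ih (w j) j
        rw [if_pos (show (-100000000000 : Int) < total - w j by omega)] at H
        simpa using H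
      · rw [if_neg (show ¬ total - b < total - w j by omega), if_neg hu]
        have H := ih b mj
        rw [if_pos hb] at H
        simpa using H
    · rw [if_neg hb]
      by_cases hu : (-100000000000 : Int) < total - w j
      · rw [if_pos hu, if_pos (show w j < b by omega)]
        have H := ih (w j) j
        rw [if_pos hu] at H
        simpa using H
      · rw [if_neg hu]
        by_cases hu2 : w j < b
        · rw [if_pos hu2]
          have H := ih (w j) j
          rw [if_neg (show ¬ (-100000000000 : Int) < total - w j by omega)] at H
          simpa using H
        · rw [if_neg hu2]
          have H := ih b mj
          rw [if_neg hb] at H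
          simpa using H

-- result of the "max" fold: value matches index, index is init or a member
theorem fold_gt_inv (v : Int → Int) :
    ∀ (is : List Int) (b mi : Int), b = v mi →
    (is.foldl (fun (st : Int × Int) i => if st.1 < v i then (v i, i) else st) (b, mi)).1
      = v (is.foldl (fun (st : Int × Int) i => if st.1 < v i then (v i, i) else st) (b, mi)).2
    ∧ ((is.foldl (fun (st : Int × Int) i => if st.1 < v i then (v i, i) else st) (b, mi)).2 = mi
        ∨ (is.foldl (fun (st : Int × Int) i => if st.1 < v i then (v i, i) else st) (b, mi)).2 ∈ is) := by
  intro is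
  induction is with
  | nil => intro b mi h; exact ⟨h, Or.inl rfl⟩
  | cons i rest ih =>
    intro b mi h
    simp only [List.foldl_cons, List.mem_cons]
    by_cases hu : b < v i
    · rw [if_pos hu]
      rcases ih (v i) i rfl with ⟨h1, h2⟩
      exact ⟨h1, Or.inr h2⟩
    · rw [if_neg hu]
      rcases ih b mi h with ⟨h1, h2⟩
      exact ⟨h1, h2.imp id Or.inr⟩

-- result of the "min" fold: value matches index, index is init or member, value is a lower bound
theorem fold_lt_inv (w : Int → Int) :
    ∀ (is : List Int) (b mj : Int), b = w mj →
    (is.foldl (fun (st : Int × Int) j => if w j < st.1 then (w j, j) else st) (b, mj)).1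
      = w (is.foldl (fun (st : Int × Int) j => if w j < st.1 then (w j, j) else st) (b, mj)).2
    ∧ ((is.foldl (fun (st : Int × Int) j => if w j < st.1 then (w j, j) else st) (b, mj)).2 = mj
        ∨ (is.foldl (fun (st : Int × Int) j => if w j < st.1 then (w j, j) else st) (b, mj)).2 ∈ is)
    ∧ (is.foldl (fun (st : Int × Int) j => if w j < st.1 then (w j, j) else st) (b, mj)).1 ≤ b
    ∧ ∀ j ∈ is, (is.foldl (fun (st : Int × Int) j => if w j < st.1 then (w j, j) else st) (b, mj)).1 ≤ w j := by
  intro is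
  induction is with
  | nil => intro b mj h; exact ⟨h, Or.inl rfl, le_refl _, by intro j hj; simp at hj⟩
  | cons j rest ih =>
    intro b mj h
    simp only [List.foldl_cons, List.mem_cons]
    by_cases hu : w j < b
    · rw [if_pos hu]
      rcases ih (w j) j rfl with ⟨h1, h2, h3, h4⟩
      refine ⟨h1, Or.inr h2, by omega, ?_⟩
      intro j' hj'
      rcases hj' with hj' | hj'
      · subst hj'; exact h3
      · exact h4 j' hj'
    · rw [if_neg hu]
      rcases ih b mj h with ⟨h1, h2, h3, h4⟩
      refine ⟨h1, h2.imp id Or.inr, h3, ?_⟩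
      intro j' hj'
      rcases hj' with hj' | hj'
      · subst hj'; omega
      · exact h4 j' hj'

-- generic congruence for foldl over members
theorem fold_congr {α β : Type} (l : List α) (f g : β → α → β)
    (h : ∀ (b : β) (x : α), x ∈ l → f b x = g b x) :
    ∀ (i : β), l.foldl f i = l.foldl g i := by
  induction l with
  | nil => intro i; rfl
  | cons x xs ih =>
    intro i
    rw [List.foldl_cons, List.foldl_cons, h i x (by simp)]
    exact ih (fun b y hy => h b y (by simp [hy])) _

theorem sum_take_drop (L : List Int) (a m : Nat) :
    ((L.drop a).take m).sum = (L.take (a + m)).sum - (L.take a).sum := by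
  rw [List.take_add, List.sum_append]
  omega

theorem main_cons (x : Int) (xs : List Int) (hDom : Dom_partial_max (x :: xs)) :
    partial_max (x :: xs) = partial_max_alt (x :: xs) := by
  set L := x :: xs with hLdef
  have hne : L ≠ [] := by simp [hLdef]
  have hdom' : ∀ y ∈ L, -2147483648 ≤ y ∧ y ≤ 2147483648 := by
    intro y hy
    unfold Dom_partial_max at hDom
    rw [List.all_eq_true] at hDom
    have := hDom y hy
    simp [pvDomInt] at this
    omega
  set v : Int → Int := fun i => (L.take (i.toNat + 1)).sum with hv
  set w : Int → Int := fun j => (L.take j.toNat).sum with hw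
  set N : Int := (L.length : Int) with hN
  have hN1 : 1 ≤ N := by simp [hN, hLdef]
  have hcons : PySem.List.pyRange 0 N 1 = 0 :: PySem.List.pyRange 1 N 1 := by
    have := PySem.List.pyRange_one_cons (show (0:Int) < N by omega)
    simpa using this
  have hv0 : v 0 = x := by simp [hv, hLdef]
  have hx : -2147483648 ≤ x ∧ x ≤ 2147483648 := hdom' x (by simp [hLdef])
  have hw0 : w 0 = 0 := by simp [hw]
  -- A's first loop, slice sums replaced by prefix sums
  have eA1 : (PySem.List.pyRange 0 N 1).foldl
      (fun (st : Int × Int) i =>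
        if st.1 < (PySem.List.slice L none (some (i + 1))).sum then
          ((PySem.List.slice L none (some (i + 1))).sum, i) else st) (-100000000000, 0)
      = (PySem.List.pyRange 1 N 1).foldl
          (fun (st : Int × Int) i => if st.1 < v i then (v i, i) else st) (v 0, 0) := by
    rw [fold_congr _ _ (fun (st : Int × Int) i => if st.1 < v i then (v i, i) else st)
      (by
        intro st i hi
        rcases PySem.List.mem_pyRange_one.mp hi with ⟨h0, h1⟩
        have hsl : (PySem.List.slice L none (some (i + 1))).sum = v i := by
          rw [PySem.List.slice_to L (by omega : (0:Int) ≤ i + 1)]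
          have ht : (i + 1).toNat = i.toNat + 1 := by omega
          rw [hv, ht]
        rw [hsl])]
    rw [hcons, List.foldl_cons]
    have h01 : (-100000000000 : Int) < v 0 := by rw [hv0]; omega
    simp only [if_pos h01]
  -- A's second loop, suffix sums replaced by total minus prefix sums
  have eA2 : (PySem.List.pyRange 0 N 1).foldl
      (fun (st : Int × Int) j =>
        if st.1 < (PySem.List.slice L (some j) none).sum then
          ((PySem.List.slice L (some j) none).sum, j) else st) (-100000000000, 0)
      = (fun r : Int × Int =>
          if (-100000000000 : Int) < L.sum - r.1 then (L.sum - r.1, r.2) else (-100000000000, 0))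
        ((PySem.List.pyRange 1 N 1).foldl
          (fun (st : Int × Int) j => if w j < st.1 then (w j, j) else st) (0, 0)) := by
    rw [fold_congr _ _ (fun (st : Int × Int) j => if st.1 < L.sum - w j then (L.sum - w j, j) else st)
      (by
        intro st j hj
        rcases PySem.List.mem_pyRange_one.mp hj with ⟨h0, h1⟩
        have hsl : (PySem.List.slice L (some j) none).sum = L.sum - w j := by
          rw [PySem.List.slice_from L (by omega : (0:Int) ≤ j), sum_drop, hw]
        rw [hsl])]
    rw [hcons, List.foldl_cons]
    exact inv2 L.sum w (PySem.List.pyRange 1 N 1) (w 0) 0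
  -- B's prefix-sum construction
  have eB : (x :: xs).foldl (fun (st : Int × List Int) y => (st.1 + y, st.2 ++ [st.1 + y])) (0, [])
      = (L.sum, pxs 0 L) := by
    rw [b_build]
    simp [hLdef]
  have hlenp : (pxs 0 L).length = L.length := pxs_length L 0
  -- enumerate pref = indexed prefix sums
  have E1 : PySem.List.enumerate (pxs 0 L) 0
      = (PySem.List.pyRange 0 N 1).map (fun i => (i, v i)) := by
    apply List.ext_getElem
    · simp [PySem.List.length_enumerate, hlenp, PySem.List.length_pyRange_one, hN]
    · intro k h1 h2
      rw [PySem.List.getElem_enumerate, List.getElem_map, PySem.List.getElem_pyRange_one]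
      have hk : k < (pxs 0 L).length := by simpa [PySem.List.length_enumerate] using h1
      rw [pxs_getElem L 0 k hk]
      have : ((0 : Int) + (k : Int)).toNat = k := by omega
      simp [hv]
  have E2 : PySem.List.enumerate (pxs 0 L).dropLast 1
      = (PySem.List.pyRange 1 N 1).map (fun j => (j, w j)) := by
    apply List.ext_getElem
    · simp [PySem.List.length_enumerate, hlenp, PySem.List.length_pyRange_one, hN]
    · intro k h1 h2
      rw [PySem.List.getElem_enumerate, List.getElem_map, PySem.List.getElem_pyRange_one]
      have hk1 : k < (pxs 0 L).dropLast.length := by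
        simpa [PySem.List.length_enumerate] using h1
      have hk : k < (pxs 0 L).length := lt_of_lt_of_le hk1 (by simp)
      rw [List.getElem_dropLast, pxs_getElem L 0 k hk]
      have : ((1 : Int) + (k : Int)).toNat = k + 1 := by omega
      simp [hw, this]
  have hheadD : (pxs 0 L).headD 0 = v 0 := by
    rw [hLdef]
    simp [pxs, hv0]
  -- B's first scan equals A's first loop
  have eB1 : (PySem.List.enumerate (pxs 0 L) 0).foldl
      (fun (st : Int × Int) iv => if iv.2 > st.1 then (iv.2, iv.1) else st) ((pxs 0 L).headD 0, 0)
      = (PySem.List.pyRange 1 N 1).foldl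
          (fun (st : Int × Int) i => if st.1 < v i then (v i, i) else st) (v 0, 0) := by
    rw [hheadD, E1, hcons, List.map_cons, List.foldl_cons]
    have hinit : ¬ (((0 : Int), v 0).2 > ((v 0, (0 : Int))).1) := lt_irrefl (v 0)
    rw [if_neg hinit, ← fold_pairs_gt]
  -- B's second scan
  have eB2 : (PySem.List.enumerate (pxs 0 L).dropLast 1).foldl
      (fun (st : Int × Int) jp => if jp.2 < st.1 then (jp.2, jp.1) else st) (0, 0)
      = (PySem.List.pyRange 1 N 1).foldl
          (fun (st : Int × Int) j => if w j < st.1 then (w j, j) else st) (0, 0) := by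
    rw [E2, ← fold_pairs_lt]
  -- facts about the two scan results
  set r1 := (PySem.List.pyRange 1 N 1).foldl
      (fun (st : Int × Int) i => if st.1 < v i then (v i, i) else st) (v 0, 0) with hr1
  set r2 := (PySem.List.pyRange 1 N 1).foldl
      (fun (st : Int × Int) j => if w j < st.1 then (w j, j) else st) (0, 0) with hr2
  obtain ⟨hr1v, hr1mem⟩ := fold_gt_inv v (PySem.List.pyRange 1 N 1) (v 0) 0 rfl
  obtain ⟨hr2w, hr2mem, hr2le0, hr2lb⟩ := fold_lt_inv w (PySem.List.pyRange 1 N 1) 0 0 (by rw [hw0])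
  rw [← hr1] at hr1v hr1mem
  rw [← hr2] at hr2w hr2mem hr2le0 hr2lb
  have hmi : 0 ≤ r1.2 ∧ r1.2 < N := by
    rcases hr1mem with h | h
    · omega
    · rcases PySem.List.mem_pyRange_one.mp h with ⟨h1, h2⟩; omega
  have hmj : 0 ≤ r2.2 ∧ r2.2 < N := by
    rcases hr2mem with h | h
    · omega
    · rcases PySem.List.mem_pyRange_one.mp h with ⟨h1, h2⟩; omega
  -- the sentinel is escaped at the end of A's suffix loop
  have hlen1 : 1 ≤ L.length := by simp [hLdef]
  have hlast : (L.drop (L.length - 1)).sum = L[L.length - 1]'(by omega) := by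
    rw [List.drop_eq_getElem_cons (by omega)]
    have hh : L.length - 1 + 1 = L.length := by omega
    rw [hh, List.drop_length]
    simp
  have hesc : (-100000000000 : Int) < L.sum - r2.1 := by
    have hub : r2.1 ≤ (L.take (L.length - 1)).sum := by
      by_cases hn1 : L.length = 1
      · simpa [hn1] using hr2le0
      · have hmem : (N - 1) ∈ PySem.List.pyRange 1 N 1 := by
          rw [PySem.List.mem_pyRange_one]
          omega
        have := hr2lb (N - 1) hmem
        have ht : (N - 1).toNat = L.length - 1 := by omega
        simp only [hw] at this
        rw [ht] at this
        exact this
    have hge : -2147483648 ≤ (L.drop (L.length - 1)).sum := by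
      rw [hlast]
      exact (hdom' _ (List.getElem_mem _)).1
    have := sum_drop L (L.length - 1)
    omega
  -- assemble
  show partial_max L = partial_max_alt L
  rw [partial_max, partial_max_alt]
  rw [if_neg hne]
  simp only []
  have hwrap : (fun r : Int × Int =>
      if (-100000000000 : Int) < L.sum - r.1 then (L.sum - r.1, r.2) else ((-100000000000 : Int), (0 : Int))) r2
      = (L.sum - r2.1, r2.2) := if_pos hesc
  rw [eB, eA1, eA2, eB1, eB2, hwrap]
  dsimp only
  by_cases hge : r1.2 ≥ r2.2
  · rw [if_pos hge, if_pos hge]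
    rw [PySem.List.slice_toNat L (by omega) (by omega)]
    rw [sum_take_drop]
    have ha : r2.2.toNat + ((r1.2 + 1).toNat - r2.2.toNat) = r1.2.toNat + 1 := by omega
    rw [ha, hr1v, hr2w]
  · rw [if_neg hge, if_neg hge]
    have hsl1 : (PySem.List.slice L (some r2.2) none).sum = L.sum - r2.1 := by
      rw [PySem.List.slice_from L (by omega : (0:Int) ≤ r2.2), sum_drop, hr2w]
    have hsl2 : (PySem.List.slice L none (some (r1.2 + 1))).sum = r1.1 := by
      rw [PySem.List.slice_to L (by omega : (0:Int) ≤ r1.2 + 1)]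
      have ht : (r1.2 + 1).toNat = r1.2.toNat + 1 := by omega
      rw [ht, hr1v]
    rw [hsl1, hsl2]

-- ===== VERDICT (by name: the statement is the Claim_ definition above) =====
theorem partial_max_spec : Claim_equal_partial_max := by
  intro L hDom
  unfold Spec_partial_max
  rcases L with _ | ⟨x, xs⟩
  · decide
  · exact main_cons x xs hDom
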